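-- pv_equiv track=rewrite | github.com/TbrBrbs97/thesis-don-pbs | requests_generation.py | group_requests_dt
-- ===== SOURCE A (Python) =====
-- def select_requests(requests, od):
--     return [x for x in requests if x[0] == od]
--
-- def group_requests_dt(requests, dep_t_th, od_pairs):
--
--     grouped_requests = {}
--
--     for od in od_pairs:
--         grouped_requests[od] = []
--         list_requests_od =select_requests(requests, od)
--
--         first_dep = list_requests_od[0]
--         group = [first_dep]
--         grouped_requests[od].append(group)
--         r = 1
--
--         while r < len(list_requests_od):
--             if list_requests_od[r][1] > first_dep[1] + dep_t_th:
--                 first_dep = list_requests_od[r]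
--                 group = [first_dep]
--                 grouped_requests[od].append(group)
--             else:
--                 group.append(list_requests_od[r])
--
--             r += 1
--
--     return grouped_requests
-- ===== SOURCE B (Python) =====
-- def _split_groups(lst, dep_t_th):
--     # cut a bucket (requests of one od, in input order) into threshold groups
--     groups = []
--     i = 0
--     n = len(lst)
--     while i < n:
--         first = lst[i]
--         j = i + 1
--         while j < n and lst[j][1] <= first[1] + dep_t_th:
--             j += 1
--         groups.append(lst[i:j])
--         i = j
--     return groups
--
-- def group_requests_dt(requests, dep_t_th, od_pairs):
--     if not od_pairs:
--         return {}
--     buckets = {}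
--     for x in requests:
--         buckets.setdefault(x[0], []).append(x)
--     return {od: _split_groups(buckets[od], dep_t_th) for od in od_pairs}
-- ===== Notes on version B (the rewrite author's own statement) =====
-- stated objective: faster
-- what changed: one pass buckets all requests into a dict keyed by od (replacing the per-od filter scan of the whole request list), then each bucket is cut into threshold groups by an index/slice scan instead of mutating a shared group list; empty od_pairs returns {} immediately
import Mathlib
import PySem

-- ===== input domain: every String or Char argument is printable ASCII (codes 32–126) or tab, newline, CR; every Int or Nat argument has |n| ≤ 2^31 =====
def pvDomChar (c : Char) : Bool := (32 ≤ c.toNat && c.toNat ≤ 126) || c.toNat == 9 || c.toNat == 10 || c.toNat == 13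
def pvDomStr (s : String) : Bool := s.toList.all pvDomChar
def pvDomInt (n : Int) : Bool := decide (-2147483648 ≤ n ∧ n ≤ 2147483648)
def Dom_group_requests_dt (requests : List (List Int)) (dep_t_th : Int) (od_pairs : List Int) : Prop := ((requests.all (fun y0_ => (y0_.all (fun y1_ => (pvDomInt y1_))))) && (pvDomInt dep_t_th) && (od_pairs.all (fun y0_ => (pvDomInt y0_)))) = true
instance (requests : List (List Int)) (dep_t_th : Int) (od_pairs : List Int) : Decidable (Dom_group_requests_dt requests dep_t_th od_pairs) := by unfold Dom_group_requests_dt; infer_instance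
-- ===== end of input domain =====

-- B replaces A's per-od rescans of the whole request list by one bucketing pass over requests
-- plus a per-bucket slicing scan (objective: faster, asymptotic).


-- ===== PORT A =====
-- x[0] / x[1]; the index is in range on every access Pre_ admits, so the .getD default is unreachable there
def pvIdx0 (x : List Int) : Int := (PySem.List.pyGet? x 0).getD 0
def pvIdx1 (x : List Int) : Int := (PySem.List.pyGet? x 1).getD 0

def select_requests (requests : List (List Int)) (od : Int) : List (List Int) :=
  requests.filter (fun x => pvIdx0 x == od)

-- A's while loop over r = 1 .. len-1 with the mutable state (first_dep, group, grouped_requests[od])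
def pvAGroup (dep_t_th : Int) (first_dep : List Int) (group : List (List Int))
    (acc : List (List (List Int))) : List (List Int) → List (List (List Int))
  | [] => acc ++ [group]
  | x :: rest =>
    if pvIdx1 x > pvIdx1 first_dep + dep_t_th then
      pvAGroup dep_t_th x [x] (acc ++ [group]) rest
    else
      pvAGroup dep_t_th first_dep (group ++ [x]) acc rest

def group_requests_dt (requests : List (List Int)) (dep_t_th : Int) (od_pairs : List Int) :
    List (Int × List (List (List Int))) :=
  (od_pairs.foldl (fun d od =>
      match select_requests requests od with
      | [] => d.insert od []      -- Python raises IndexError here (list_requests_od[0]); excluded by Pre_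
      | f :: rest => d.insert od (pvAGroup dep_t_th f [f] [] rest))
    (PySem.Dict.empty : PySem.Dict Int (List (List (List Int))))).items

-- ===== PORT B =====
-- _split_groups: the outer while consumes lst[i:]; each iteration takes the slice lst[i:j]
-- (first element plus the prefix within threshold) and continues on lst[j:]
def pvSplitGroups (dep_t_th : Int) (lst : List (List Int)) : List (List (List Int)) :=
  match lst with
  | [] => []
  | first :: rest =>
    (first :: rest.takeWhile (fun x => pvIdx1 x ≤ pvIdx1 first + dep_t_th)) ::
      pvSplitGroups dep_t_th (rest.dropWhile (fun x => pvIdx1 x ≤ pvIdx1 first + dep_t_th))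
termination_by lst.length
decreasing_by
  exact Nat.lt_succ_of_le (List.length_dropWhile_le _ _)

def group_requests_dt_alt (requests : List (List Int)) (dep_t_th : Int) (od_pairs : List Int) :
    List (Int × List (List (List Int))) :=
  if od_pairs.isEmpty then []         -- 'if not od_pairs: return {}'
  else
    let buckets := requests.foldl (fun d x => d.modify (pvIdx0 x) [] (· ++ [x]))
      (PySem.Dict.empty : PySem.Dict Int (List (List Int)))
    -- buckets[od]: the key is present under Pre_ (KeyError excluded), so the getD default is unreachable there
    (od_pairs.foldl (fun d od => d.insert od (pvSplitGroups dep_t_th (buckets.getD od [])))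
      (PySem.Dict.empty : PySem.Dict Int (List (List (List Int))))).items

-- ===== PRECONDITION & SPEC =====
-- Pre_ excludes exactly the inputs where A raises IndexError: with od_pairs nonempty, an empty
-- request row (x[0] in the filter), an od with no matching request (list_requests_od[0]), or a
-- row shorter than 2 inside a bucket of size ≥ 2 (the [1] accesses of the while loop).
def Pre_group_requests_dt (requests : List (List Int)) (dep_t_th : Int) (od_pairs : List Int) : Prop :=
  (od_pairs ≠ [] → ∀ x ∈ requests, x ≠ []) ∧
  ∀ od ∈ od_pairs,
    (requests.filter (fun x => x.headI == od)) ≠ [] ∧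
    (2 ≤ (requests.filter (fun x => x.headI == od)).length →
      ∀ x ∈ requests.filter (fun x => x.headI == od), 2 ≤ x.length)
instance (requests : List (List Int)) (dep_t_th : Int) (od_pairs : List Int) : Decidable (Pre_group_requests_dt requests dep_t_th od_pairs) := by unfold Pre_group_requests_dt; infer_instance

def pvWitness_group_requests_dt : List (List Int) × Int × List Int :=
  ([[1, 0], [1, 5], [2, 3]], 2, [1, 2])

def Spec_group_requests_dt (requests : List (List Int)) (dep_t_th : Int) (od_pairs : List Int) (out : List (Int × List (List (List Int)))) : Prop := out = group_requests_dt_alt requests dep_t_th od_pairs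
instance (requests : List (List Int)) (dep_t_th : Int) (od_pairs : List Int) (out : List (Int × List (List (List Int)))) : Decidable (Spec_group_requests_dt requests dep_t_th od_pairs out) := by unfold Spec_group_requests_dt; infer_instance

-- ===== CLAIM (what is proved, stated in full; the proofs are below) =====
def Claim_equal_group_requests_dt : Prop := ∀ (requests : List (List Int)) (dep_t_th : Int) (od_pairs : List Int), Dom_group_requests_dt requests dep_t_th od_pairs → Pre_group_requests_dt requests dep_t_th od_pairs → Spec_group_requests_dt requests dep_t_th od_pairs (group_requests_dt requests dep_t_th od_pairs)

-- ===== LEMMAS AND PROOFS =====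

-- A's grouping loop computes exactly B's split of the remaining bucket
theorem pvAGroup_eq_split (dep_t_th : Int) :
    ∀ (rest : List (List Int)) (first_dep : List Int) (group : List (List Int))
      (acc : List (List (List Int))),
      pvAGroup dep_t_th first_dep group acc rest =
        acc ++ ((group ++ rest.takeWhile (fun x => pvIdx1 x ≤ pvIdx1 first_dep + dep_t_th)) ::
          pvSplitGroups dep_t_th (rest.dropWhile (fun x => pvIdx1 x ≤ pvIdx1 first_dep + dep_t_th))) := by
  intro rest
  induction rest with
  | nil => intro f g a; simp [pvAGroup, pvSplitGroups]
  | cons x rest ih =>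
    intro f g a
    by_cases h : pvIdx1 x > pvIdx1 f + dep_t_th
    · have hx : ¬ (pvIdx1 x ≤ pvIdx1 f + dep_t_th) := by omega
      simp only [pvAGroup, if_pos h, List.takeWhile_cons, List.dropWhile_cons]
      rw [ih]
      simp [hx, pvSplitGroups]
    · have hx : pvIdx1 x ≤ pvIdx1 f + dep_t_th := by omega
      simp only [pvAGroup, if_neg h, List.takeWhile_cons, List.dropWhile_cons]
      rw [ih]
      simp [hx]

theorem pvAGroup_bucket (dep_t_th : Int) (bucket : List (List Int)) :
    (match bucket with
     | [] => ([] : List (List (List Int)))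
     | f :: rest => pvAGroup dep_t_th f [f] [] rest) = pvSplitGroups dep_t_th bucket := by
  cases bucket with
  | nil => simp [pvSplitGroups]
  | cons f rest =>
    simp only []
    rw [pvAGroup_eq_split]
    simp [pvSplitGroups]

-- B's bucketing pass reproduces A's per-od filter
theorem pvBuckets_getD (requests : List (List Int)) (od : Int) :
    (requests.foldl (fun d x => d.modify (pvIdx0 x) [] (· ++ [x]))
        (PySem.Dict.empty : PySem.Dict Int (List (List Int)))).getD od [] =
      select_requests requests od := by
  have h : requests.foldl (fun d x => d.modify (pvIdx0 x) [] (· ++ [x]))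
        (PySem.Dict.empty : PySem.Dict Int (List (List Int))) =
      (requests.map (fun x => (pvIdx0 x, x))).foldl
        (fun d p => d.modify p.1 [] (· ++ [p.2])) PySem.Dict.empty := by
    rw [List.foldl_map]
  rw [h, PySem.Dict.getD_foldl_modify_append, List.filter_map]
  simp [select_requests, Function.comp_def]

theorem group_requests_dt_eq (requests : List (List Int)) (dep_t_th : Int) (od_pairs : List Int) :
    group_requests_dt requests dep_t_th od_pairs = group_requests_dt_alt requests dep_t_th od_pairs := by
  unfold group_requests_dt group_requests_dt_alt
  cases od_pairs with
  | nil => rfl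
  | cons o os =>
    simp only [List.isEmpty_cons, if_neg Bool.false_ne_true]
    congr 1
    apply PySem.List.foldl_congr_mem
    intro d od _
    rw [pvBuckets_getD, ← pvAGroup_bucket]
    cases select_requests requests od <;> rfl

-- ===== VERDICT (by name: the statement is the Claim_ definition above) =====
theorem group_requests_dt_spec : Claim_equal_group_requests_dt := by
  intro requests dep_t_th od_pairs _ _
  unfold Spec_group_requests_dt
  exact group_requests_dt_eq requests dep_t_th od_pairs
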